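-- pv_equiv track=rewrite | github.com/davidzhou310/DDDDD | pick_your_letters.py | get_similarity_level
-- ===== SOURCE A (Python) =====
-- def get_similarity_level(word, target_word):
--     """
--     Parameter word is a list of letter split by new word after computer discard one card
--     Parameter target_word is a list of target word to win the game
--     This function is to get the similarity level of the word compared with the target word: level 1 is having 1 letter same, level 4 is having 4 letters same, level len(word) is exactly same, which means winning
--     """
--     #initialize a list which index is the similarity level, value is how many word in target list are in this similarity level compare with the checking word
--     similarity_list = [0] * (len(word) + 1)
--     for target in target_word:
--         count = 0 #count how many letters are same
--         for j in range(len(word)):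
--             if word[j] == target[j]:
--                 count += 1
--         similarity_list[count] += 1
--     for level, freq in enumerate(reversed(similarity_list)): #sorted it in descending order and return its index as similarity level
--         if freq > 0:
--             return len(word) - level #since the index has been reversed
-- ===== SOURCE B (Python) =====
-- def get_similarity_level(word, target_word):
--     best = None
--     for target in target_word:
--         count = 0
--         for j in range(len(word)):
--             if word[j] == target[j]:
--                 count += 1
--         if best is None or count > best:
--             best = count
--     return best
-- ===== Notes on version B (the rewrite author's own statement) =====
-- stated objective: simpler
-- what changed: Replaces the frequency histogram plus reverse-scan post-pass with a single running maximum over the per-target match counts.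
import Mathlib
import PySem

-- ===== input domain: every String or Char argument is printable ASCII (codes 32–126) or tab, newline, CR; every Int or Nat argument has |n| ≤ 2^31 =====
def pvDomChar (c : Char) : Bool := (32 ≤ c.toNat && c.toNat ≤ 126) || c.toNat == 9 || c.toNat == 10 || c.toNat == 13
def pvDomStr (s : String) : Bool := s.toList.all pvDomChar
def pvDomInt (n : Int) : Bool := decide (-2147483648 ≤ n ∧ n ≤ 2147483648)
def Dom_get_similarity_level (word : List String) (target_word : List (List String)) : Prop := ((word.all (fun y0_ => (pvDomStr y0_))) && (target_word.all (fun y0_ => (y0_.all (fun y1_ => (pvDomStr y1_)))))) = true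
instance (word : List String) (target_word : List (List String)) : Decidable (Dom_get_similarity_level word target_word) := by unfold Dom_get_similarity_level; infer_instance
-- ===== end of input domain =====

-- B replaces A's frequency-histogram + reverse-scan post-pass by a single running maximum
-- over the per-target match counts (objective: simpler; same asymptotic cost).

-- ===== PORT A =====
-- Inner loop shared verbatim by both Pythons: count of j in range(len(word)) with word[j] == target[j].
-- word.getD j "" is exact (j < word.length always); target.getD j "" is exact on Pre_ (word.length ≤ target.length);
-- outside Pre_ the Python raises IndexError, which Pre_ excludes.
def pvCount (word t : List String) : Nat :=
  (List.range word.length).foldl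
    (fun count j => if word.getD j "" = t.getD j "" then count + 1 else count) 0

-- "for level, freq in enumerate(reversed(similarity_list)): if freq > 0: return …"
def pvScan : List Nat → Nat → Option Nat
  | [], _ => none
  | f :: rest, level => if 0 < f then some level else pvScan rest (level + 1)

def get_similarity_level (word : List String) (target_word : List (List String)) : Option Int :=
  let similarity_list :=
    target_word.foldl (fun sl target => sl.modify (pvCount word target) (· + 1))
      (List.replicate (word.length + 1) 0)
  (pvScan similarity_list.reverse 0).map (fun level => ((word.length - level : Nat) : Int))

-- ===== PORT B =====
def get_similarity_level_alt (word : List String) (target_word : List (List String)) : Option Int :=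
  let best := target_word.foldl
    (fun best target =>
      let count := pvCount word target
      match best with
      | none => some count
      | some b => if b < count then some count else some b) none
  best.map (fun (b : Nat) => (b : Int))

-- ===== PRECONDITION & SPEC =====
-- Pre_ excludes exactly the inputs where the Python A (and B) raises IndexError:
-- some target shorter than word.
def Pre_get_similarity_level (word : List String) (target_word : List (List String)) : Prop :=
  ∀ t ∈ target_word, word.length ≤ t.length
instance (word : List String) (target_word : List (List String)) : Decidable (Pre_get_similarity_level word target_word) := by unfold Pre_get_similarity_level; infer_instance

def pvWitness_get_similarity_level : List String × List (List String) :=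
  (["a", "b"], [["a", "c"], ["b", "b"]])

def Spec_get_similarity_level (word : List String) (target_word : List (List String)) (out : Option Int) : Prop := out = get_similarity_level_alt word target_word
instance (word : List String) (target_word : List (List String)) (out : Option Int) : Decidable (Spec_get_similarity_level word target_word out) := by unfold Spec_get_similarity_level; infer_instance

-- ===== CLAIM (what is proved, stated in full; the proofs are below) =====
def Claim_equal_get_similarity_level : Prop := ∀ (word : List String) (target_word : List (List String)), Dom_get_similarity_level word target_word → Pre_get_similarity_level word target_word → Spec_get_similarity_level word target_word (get_similarity_level word target_word)

-- ===== LEMMAS AND PROOFS =====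

-- m is the maximum of the list L
def pvIsMax (m : Nat) (L : List Nat) : Prop := m ∈ L ∧ ∀ x ∈ L, x ≤ m

lemma pvIsMax_unique {m m' : Nat} {L : List Nat} (h : pvIsMax m L) (h' : pvIsMax m' L) : m = m' :=
  Nat.le_antisymm (h'.2 m h.1) (h.2 m' h'.1)

lemma pvCount_le (word t : List String) : pvCount word t ≤ word.length := by
  have aux : ∀ (l : List Nat) (c : Nat),
      l.foldl (fun count j => if word.getD j "" = t.getD j "" then count + 1 else count) c
        ≤ c + l.length := by
    intro l
    induction l with
    | nil => intro c; simp
    | cons j l ih =>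
      intro c
      simp only [List.foldl_cons, List.length_cons]
      split
      · exact le_trans (ih (c + 1)) (by omega)
      · exact le_trans (ih c) (by omega)
  simpa [pvCount] using aux (List.range word.length) 0

-- the histogram loop: lengths are preserved
lemma pvHist_length (word : List String) (ts : List (List String)) (h : List Nat) :
    (ts.foldl (fun sl target => sl.modify (pvCount word target) (· + 1)) h).length = h.length := by
  induction ts generalizing h with
  | nil => rfl
  | cons t ts ih => simp [List.foldl_cons, ih, List.length_modify]

-- the histogram counts occurrences of each match count
lemma pvHist_getD (word : List String) (ts : List (List String)) (h : List Nat) (k : Nat)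
    (hk : k < h.length) (hall : ∀ t ∈ ts, pvCount word t < h.length) :
    (ts.foldl (fun sl target => sl.modify (pvCount word target) (· + 1)) h).getD k 0
      = h.getD k 0 + (ts.map (pvCount word)).count k := by
  induction ts generalizing h with
  | nil => simp
  | cons t ts ih =>
    simp only [List.foldl_cons, List.map_cons]
    have hc : pvCount word t < h.length := hall t (by simp)
    have hlen : (h.modify (pvCount word t) (· + 1)).length = h.length := List.length_modify ..
    have hk' : k < (h.modify (pvCount word t) (· + 1)).length := by omega
    have hstep : (h.modify (pvCount word t) (· + 1)).getD k 0
        = h.getD k 0 + if pvCount word t = k then 1 else 0 := by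
      rw [List.getD_eq_getElem _ _ hk', List.getD_eq_getElem _ _ hk, List.getElem_modify]
      split <;> simp
    rw [ih (h.modify (pvCount word t) (· + 1)) (by omega)
        (by intro t' ht'; rw [hlen]; exact hall t' (by simp [ht'])), hstep]
    simp only [List.count_cons, beq_iff_eq]
    split_ifs <;> omega

lemma pvScan_none (l : List Nat) (i : Nat) : pvScan l i = none ↔ ∀ f ∈ l, f = 0 := by
  induction l generalizing i with
  | nil => simp [pvScan]
  | cons f rest ih =>
    by_cases hf : 0 < f
    · simp [pvScan, hf]; omega
    · simp [pvScan, hf, ih (i + 1)]; omega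

lemma pvScan_some (l : List Nat) (i v : Nat) (h : pvScan l i = some v) :
    ∃ j, j < l.length ∧ v = i + j ∧ 0 < l.getD j 0 ∧ ∀ j', j' < j → l.getD j' 0 = 0 := by
  induction l generalizing i with
  | nil => simp [pvScan] at h
  | cons f rest ih =>
    by_cases hf : 0 < f
    · refine ⟨0, by simp, ?_, by simpa, by omega⟩
      simp [pvScan, hf] at h; omega
    · simp only [pvScan, if_neg hf] at h
      obtain ⟨j, hj, hv, hpos, hmin⟩ := ih (i + 1) h
      refine ⟨j + 1, by simpa using hj, by omega, by simpa using hpos, ?_⟩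
      intro j' hj'
      cases j' with
      | zero => simp; omega
      | succ j' => simpa using hmin j' (by omega)

-- characterisation of A's value on nonempty target lists
lemma A_hist_facts (word : List String) (ts : List (List String)) :
    (ts.foldl (fun sl target => sl.modify (pvCount word target) (· + 1))
        (List.replicate (word.length + 1) 0)).length = word.length + 1
    ∧ ∀ k, k < word.length + 1 →
      (ts.foldl (fun sl target => sl.modify (pvCount word target) (· + 1))
        (List.replicate (word.length + 1) 0)).getD k 0 = (ts.map (pvCount word)).count k := by
  constructor
  · rw [pvHist_length]; simp
  · intro k hk
    have := pvHist_getD word ts (List.replicate (word.length + 1) 0) k (by simpa using hk)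
      (by intro t ht; simpa using Nat.lt_succ_of_le (pvCount_le word t))
    simpa using this

lemma A_rev_getD (word : List String) (ts : List (List String)) (j : Nat)
    (hj : j < word.length + 1) :
    (ts.foldl (fun sl target => sl.modify (pvCount word target) (· + 1))
        (List.replicate (word.length + 1) 0)).reverse.getD j 0
      = (ts.map (pvCount word)).count (word.length - j) := by
  obtain ⟨hlen, hgetD⟩ := A_hist_facts word ts
  have hjr : j < (ts.foldl (fun sl target => sl.modify (pvCount word target) (· + 1))
      (List.replicate (word.length + 1) 0)).reverse.length := by
    rw [List.length_reverse, hlen]; exact hj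
  rw [List.getD_eq_getElem _ _ hjr, List.getElem_reverse,
    ← List.getD_eq_getElem _ 0 (by rw [hlen]; omega)]
  have : (ts.foldl (fun sl target => sl.modify (pvCount word target) (· + 1))
      (List.replicate (word.length + 1) 0)).length - 1 - j = word.length - j := by
    rw [hlen]; omega
  rw [this, hgetD (word.length - j) (by omega)]

lemma A_some_isMax (word : List String) (ts : List (List String)) (v : Int)
    (h : get_similarity_level word ts = some v) :
    ∃ m : Nat, v = (m : Nat) ∧ pvIsMax m (ts.map (pvCount word)) := by
  obtain ⟨hlen, hgetD⟩ := A_hist_facts word ts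
  simp only [get_similarity_level] at h
  cases hs : pvScan (ts.foldl (fun sl target => sl.modify (pvCount word target) (· + 1))
      (List.replicate (word.length + 1) 0)).reverse 0 with
  | none => rw [hs] at h; simp at h
  | some lv =>
    rw [hs] at h
    simp only [Option.map_some, Option.some.injEq] at h
    obtain ⟨j, hjlt, hlv, hpos, hmin⟩ := pvScan_some _ 0 lv hs
    rw [List.length_reverse, hlen] at hjlt
    refine ⟨word.length - j, ?_, ?_, ?_⟩
    · rw [← h, hlv]; simp
    · have := A_rev_getD word ts j hjlt
      rw [this] at hpos
      exact List.count_pos_iff.mp hpos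
    · intro x hx
      have hxle : x ≤ word.length := by
        obtain ⟨t, _, ht⟩ := List.mem_map.mp hx
        rw [← ht]; exact pvCount_le word t
      by_contra hgt
      rw [not_le] at hgt
      have hjx : word.length - x < j := by omega
      have := hmin (word.length - x) hjx
      rw [A_rev_getD word ts (word.length - x) (by omega)] at this
      have hxx : word.length - (word.length - x) = x := by omega
      rw [hxx] at this
      have : x ∈ ts.map (pvCount word) → False := by
        intro hmem
        exact absurd this (by simpa using List.count_pos_iff.mpr hmem |>.ne')
      exact this hx

lemma A_ne_none (word : List String) (ts : List (List String)) (hne : ts ≠ []) :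
    get_similarity_level word ts ≠ none := by
  obtain ⟨hlen, hgetD⟩ := A_hist_facts word ts
  obtain ⟨t, ts', rfl⟩ := List.exists_cons_of_ne_nil hne
  simp only [get_similarity_level]
  intro h
  have hs : pvScan ((t :: ts').foldl (fun sl target => sl.modify (pvCount word target) (· + 1))
      (List.replicate (word.length + 1) 0)).reverse 0 = none := by
    cases hs : pvScan _ 0 with
    | none => rfl
    | some lv => rw [hs] at h; simp at h
  have hall := (pvScan_none _ 0).mp hs
  have hc : pvCount word t < word.length + 1 := Nat.lt_succ_of_le (pvCount_le word t)
  have hpos : 0 < ((t :: ts').foldl (fun sl target => sl.modify (pvCount word target) (· + 1))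
      (List.replicate (word.length + 1) 0)).reverse.getD (word.length - pvCount word t) 0 := by
    rw [A_rev_getD word (t :: ts') _ (by omega)]
    have : word.length - (word.length - pvCount word t) = pvCount word t := by omega
    rw [this]
    exact List.count_pos_iff.mpr (by simp)
  have hlt : word.length - pvCount word t
      < ((t :: ts').foldl (fun sl target => sl.modify (pvCount word target) (· + 1))
        (List.replicate (word.length + 1) 0)).reverse.length := by
    rw [List.length_reverse, hlen]; omega
  have := hall _ (List.getD_eq_getElem _ 0 hlt ▸ List.getElem_mem hlt)
  omega

lemma A_nil (word : List String) : get_similarity_level word [] = none := by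
  simp only [get_similarity_level, List.foldl_nil]
  rw [(pvScan_none _ 0).mpr ?_]
  · rfl
  · intro f hf
    exact List.eq_of_mem_replicate (List.mem_reverse.mp hf)

-- characterisation of B's running maximum
lemma B_run (word : List String) (ts : List (List String)) (b : Nat) :
    ∃ m, ts.foldl
        (fun best target =>
          let count := pvCount word target
          match best with
          | none => some count
          | some b => if b < count then some count else some b) (some b) = some m
      ∧ b ≤ m ∧ (m = b ∨ m ∈ ts.map (pvCount word)) ∧ ∀ x ∈ ts.map (pvCount word), x ≤ m := by
  induction ts generalizing b with
  | nil => exact ⟨b, rfl, le_refl b, Or.inl rfl, by simp⟩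
  | cons t ts ih =>
    simp only [List.foldl_cons, List.map_cons]
    by_cases hlt : b < pvCount word t
    · obtain ⟨m, hm, hle, hmem, hub⟩ := ih (pvCount word t)
      refine ⟨m, by simpa [hlt] using hm, by omega, ?_, ?_⟩
      · rcases hmem with h | h
        · exact Or.inr (by simp [h])
        · exact Or.inr (by simp [h])
      · intro x hx
        rcases List.mem_cons.mp hx with h | h
        · omega
        · exact hub x h
    · obtain ⟨m, hm, hle, hmem, hub⟩ := ih b
      refine ⟨m, by simpa [hlt] using hm, hle, ?_, ?_⟩
      · rcases hmem with h | h
        · exact Or.inl h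
        · exact Or.inr (by simp [h])
      · intro x hx
        rcases List.mem_cons.mp hx with h | h
        · omega
        · exact hub x h

lemma B_cons (word : List String) (t : List String) (ts : List (List String)) :
    ∃ m : Nat, get_similarity_level_alt word (t :: ts) = some ((m : Nat) : Int)
      ∧ pvIsMax m ((t :: ts).map (pvCount word)) := by
  obtain ⟨m, hm, hle, hmem, hub⟩ := B_run word ts (pvCount word t)
  refine ⟨m, ?_, ?_, ?_⟩
  · have hrw : get_similarity_level_alt word (t :: ts)
        = (ts.foldl (fun best target =>
            let count := pvCount word target
            match best with
            | none => some count
            | some b => if b < count then some count else some b)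
            (some (pvCount word t))).map (fun (b : Nat) => (b : Int)) := rfl
    rw [hrw, hm]; rfl
  · rcases hmem with h | h
    · simp [h]
    · simp [h]
  · intro x hx
    rcases List.mem_cons.mp hx with h | h
    · omega
    · exact hub x h

-- ===== VERDICT (by name: the statement is the Claim_ definition above) =====
theorem get_similarity_level_spec : Claim_equal_get_similarity_level := by
  intro word ts _dom _pre
  unfold Spec_get_similarity_level
  cases ts with
  | nil => simp [A_nil, get_similarity_level_alt]
  | cons t ts' =>
    obtain ⟨mB, hB, hBmax⟩ := B_cons word t ts'
    cases hA : get_similarity_level word (t :: ts') with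
    | none => exact absurd hA (A_ne_none word (t :: ts') (by simp))
    | some v =>
      obtain ⟨mA, hv, hAmax⟩ := A_some_isMax word (t :: ts') v hA
      rw [hB, hv, pvIsMax_unique hAmax hBmax]
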